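-- pv_equiv track=rewrite | github.com/jordiae/cdi-compression | lossy/06.1_ScalarQ_PRACTICA.py | nivelar
-- ===== SOURCE A (Python) =====
-- def nivelar(k):
--     i = 0
--     niveles = []
--     resid = 256 % k
--     while i < 256:
--         niveles.append(i)
--         i += 256//k
--     for index, nivel in enumerate(niveles):
--         if index == 0:
--             continue
--         if resid <= 0:
--             break
--         niveles[index] += 1
--         resid -= 1
--     if 256 % k == 0:
--         niveles.append(255)
--     elif 256 % k > 1:
--         niveles[-1] = 255
--     return niveles
-- ===== SOURCE B (Python) =====
-- def nivelar(k):
--     base, resid = divmod(256, k)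
--     niveles = [0] \
--         + list(range(base + 1, resid * base + 2, base)) \
--         + list(range((resid + 1) * base, 256, base))
--     if resid == 0:
--         niveles.append(255)
--     elif resid > 1:
--         niveles[-1] = 255
--     return niveles
-- ===== Notes on version B (the rewrite author's own statement) =====
-- stated objective: alternative
-- what changed: A builds the raw point list with a while loop, then mutates the first 256%k interior entries in a second enumerate pass with an early break; B constructs the final list directly as the concatenation of three arithmetic progressions ([0], the bumped segment range(base+1, resid*base+2, base), and the unbumped tail range((resid+1)*base, 256, base)), keeping only the identical tail adjustment.
import Mathlib
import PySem

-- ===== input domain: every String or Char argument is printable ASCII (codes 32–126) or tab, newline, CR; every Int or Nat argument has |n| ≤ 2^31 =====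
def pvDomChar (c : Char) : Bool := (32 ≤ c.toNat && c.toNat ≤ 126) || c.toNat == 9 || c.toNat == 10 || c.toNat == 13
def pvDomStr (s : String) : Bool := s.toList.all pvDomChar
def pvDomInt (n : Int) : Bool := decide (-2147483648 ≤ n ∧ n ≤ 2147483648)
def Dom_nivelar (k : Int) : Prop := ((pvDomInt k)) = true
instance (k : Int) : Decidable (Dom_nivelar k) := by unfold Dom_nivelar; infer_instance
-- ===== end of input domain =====

-- B replaces A's "build the raw points, then mutate the first 256%k interior
-- entries in a second pass with an early break" by a direct construction of the
-- final list as the concatenation of three arithmetic progressions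
-- (objective: alternative, same cost).

-- ===== PORT A =====
-- while i < 256: append i; i += 256//k.  fuel 300 only makes the loop total:
-- for every k in Pre_ (1 ≤ k ≤ 256) the step is ≥ 1, so at most 256 iterations run.
def nivelarLoopA (fuel : Nat) (i step : Int) (acc : List Int) : List Int :=
  match fuel with
  | 0 => acc
  | fuel + 1 =>
    if i < 256 then nivelarLoopA fuel (i + step) step (acc ++ [i]) else acc

-- for index, nivel in enumerate(niveles): continue at 0, break at resid ≤ 0,
-- else niveles[index] += 1; resid -= 1   (in-place update, length unchanged)
-- structural on a counter n = number of positions left to visit (= length at the call)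
def nivelarFixA (n : Nat) (niveles : List Int) (index : Nat) (resid : Int) : List Int :=
  match n with
  | 0 => niveles
  | n + 1 =>
    if h : index < niveles.length then
      if index = 0 then nivelarFixA n niveles (index + 1) resid
      else if resid ≤ 0 then niveles
      else nivelarFixA n (niveles.set index (niveles[index] + 1)) (index + 1) (resid - 1)
    else niveles

def nivelar (k : Int) : List Int :=
  let resid := PySem.Int.mod 256 k
  let niveles := nivelarLoopA 300 0 (PySem.Int.floordiv 256 k) []
  let niveles := nivelarFixA niveles.length niveles 0 resid
  if PySem.Int.mod 256 k = 0 then niveles ++ [255]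
  else if PySem.Int.mod 256 k > 1 then niveles.dropLast ++ [255]  -- niveles[-1] = 255 (list never empty inside Pre_)
  else niveles

-- ===== PORT B =====
def nivelar_alt (k : Int) : List Int :=
  let base := PySem.Int.floordiv 256 k
  let resid := PySem.Int.mod 256 k
  let niveles := [(0 : Int)]
    ++ PySem.List.pyRange (base + 1) (resid * base + 2) base
    ++ PySem.List.pyRange ((resid + 1) * base) 256 base
  if resid = 0 then niveles ++ [255]
  else if resid > 1 then niveles.dropLast ++ [255]  -- niveles[-1] = 255 (list never empty inside Pre_)
  else niveles

-- ===== PRECONDITION & SPEC =====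
-- Pre_ excludes exactly the inputs on which A does not return: k = 0 raises
-- ZeroDivisionError, and for k < 0 or k > 256 A's while loop never terminates.
def Pre_nivelar (k : Int) : Prop := 1 ≤ k ∧ k ≤ 256
instance (k : Int) : Decidable (Pre_nivelar k) := by unfold Pre_nivelar; infer_instance
def pvWitness_nivelar : Int := (7)

def Spec_nivelar (k : Int) (out : List Int) : Prop := out = nivelar_alt k
instance (k : Int) (out : List Int) : Decidable (Spec_nivelar k out) := by unfold Spec_nivelar; infer_instance

-- ===== CLAIM (what is proved, stated in full; the proofs are below) =====
def Claim_equal_nivelar : Prop := ∀ (k : Int), Dom_nivelar k → Pre_nivelar k → Spec_nivelar k (nivelar k)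

-- ===== LEMMAS AND PROOFS =====

theorem pyRange_pos_nil (a b s : Int) (hs : 0 < s) (hab : b ≤ a) :
    PySem.List.pyRange a b s = [] := by
  rw [PySem.List.pyRange_of_pos a b hs]
  simp [show ¬ a < b by omega]

theorem pyRange_pos_cons (a b s : Int) (hs : 0 < s) (hab : a < b) :
    PySem.List.pyRange a b s = a :: PySem.List.pyRange (a + s) b s := by
  rw [PySem.List.pyRange_of_pos a b hs, PySem.List.pyRange_of_pos (a + s) b hs]
  have h1 : b - a + s - 1 = (b - a - 1) + 1 * s := by ring
  have h2 : (b - a + s - 1) / s = (b - a - 1) / s + 1 := by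
    rw [h1, Int.add_mul_ediv_right _ _ (by omega)]
  have h3 : 0 ≤ (b - a - 1) / s := Int.ediv_nonneg (by omega) (by omega)
  have h4 : ((b - a + s - 1) / s).toNat = ((b - a - 1) / s).toNat + 1 := by omega
  by_cases hcb : a + s < b
  · have h6 : (b - (a + s) + s - 1) / s = (b - a - 1) / s := by
      have : b - (a + s) + s - 1 = b - a - 1 := by ring
      rw [this]
    simp only [if_pos hab, if_pos hcb, h4, h6, List.range_succ_eq_map, List.map_cons,
      List.map_map]
    refine congrArg₂ List.cons (by simp) ?_
    apply List.map_congr_left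
    intro k _
    simp only [Function.comp]
    push_cast
    ring
  · have h6 : b - a - 1 < s := by omega
    have h7 : (b - a - 1) / s = 0 := by
      apply Int.ediv_eq_zero_of_lt (by omega) h6
    simp only [if_pos hab, if_neg hcb, h4, h7]
    simp

theorem loopA_eq (fuel : Nat) : ∀ (i s : Int) (acc : List Int), 0 < s →
    (256 : Int) ≤ i + fuel * s →
    nivelarLoopA fuel i s acc = acc ++ PySem.List.pyRange i 256 s := by
  induction fuel with
  | zero =>
    intro i s acc hs hf
    simp only [Nat.cast_zero, zero_mul, add_zero] at hf
    simp [nivelarLoopA, pyRange_pos_nil i 256 s hs hf]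
  | succ n ih =>
    intro i s acc hs hf
    by_cases hi : i < 256
    · rw [pyRange_pos_cons i 256 s hs hi]
      simp only [nivelarLoopA, if_pos hi]
      rw [ih (i + s) s (acc ++ [i]) hs (by push_cast at hf ⊢; linarith)]
      simp
    · simp only [nivelarLoopA, if_neg hi]
      rw [pyRange_pos_nil i 256 s hs (by omega)]
      simp

theorem fixA_id (xs : List Int) (index : Nat) (resid : Int)
    (h : ∀ j : Nat, j < xs.length → ¬ (index ≤ j ∧ (j : Int) < index + resid)) :
    xs = xs.mapIdx (fun j x => x + if index ≤ j ∧ (j : Int) < (index : Int) + resid then 1 else 0) := by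
  apply List.ext_getElem
  · simp
  · intro j h1 h2
    simp only [List.getElem_mapIdx]
    rw [if_neg (h j h1)]
    ring

theorem fixA_eq (n : Nat) : ∀ (xs : List Int) (index : Nat) (resid : Int),
    1 ≤ index → xs.length ≤ n + index →
    nivelarFixA n xs index resid =
      xs.mapIdx (fun j x => x + if index ≤ j ∧ (j : Int) < (index : Int) + resid then 1 else 0) := by
  induction n with
  | zero =>
    intro xs index resid h1 hlen
    simp only [Nat.zero_add] at hlen
    simp only [nivelarFixA]
    exact fixA_id xs index resid (by intro j hj; omega)
  | succ n ih =>
    intro xs index resid h1 hlen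
    simp only [nivelarFixA]
    by_cases h : index < xs.length
    · rw [dif_pos h, if_neg (by omega : ¬ index = 0)]
      by_cases hr : resid ≤ 0
      · rw [if_pos hr]
        exact fixA_id xs index resid (by intro j hj; omega)
      · rw [if_neg hr]
        rw [ih (xs.set index (xs[index] + 1)) (index + 1) (resid - 1) (by omega)
          (by simp; omega)]
        apply List.ext_getElem
        · simp
        · intro j hj1 hj2
          simp only [List.getElem_mapIdx, List.getElem_set]
          by_cases hji : index = j
          · subst hji
            rw [if_pos rfl,
              if_neg (by omega : ¬ (index + 1 ≤ index ∧ (index : Int) < (↑(index + 1) : Int) + (resid - 1))),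
              if_pos (⟨le_rfl, by omega⟩ : index ≤ index ∧ (index : Int) < (index : Int) + resid)]
            ring
          · rw [if_neg hji]
            split_ifs with hA hB <;> omega
    · rw [dif_neg h]
      exact fixA_id xs index resid (by intro j hj; omega)

theorem fix0_eq (xs : List Int) (resid : Int) :
    nivelarFixA xs.length xs 0 resid =
      xs.mapIdx (fun j x => x + if 1 ≤ j ∧ (j : Int) < 1 + resid then 1 else 0) := by
  cases xs with
  | nil => simp [nivelarFixA]
  | cons x xs' =>
    simp only [List.length_cons, nivelarFixA]
    rw [fixA_eq xs'.length (x :: xs') 1 resid (by omega) (by simp)]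
    norm_num

-- B's three-segment concatenation equals A's bumped point list, elementwise.
theorem ite_count (c : Prop) [Decidable c] (N : Nat)
    (h : ¬ c → N = 0) : (if c then N else 0) = N := by
  by_cases hc : c
  · rw [if_pos hc]
  · rw [if_neg hc, h hc]

theorem seg_eq (b r : Int) (hb : 1 ≤ b) (hr : 0 ≤ r) (hrb : (r + 1) * b ≤ 256) :
    (0 : Int) :: (PySem.List.pyRange (b + 1) (r * b + 2) b
      ++ PySem.List.pyRange ((r + 1) * b) 256 b)
    = (PySem.List.pyRange 0 256 b).mapIdx
        (fun j x => x + if 1 ≤ j ∧ (j : Int) < 1 + r then 1 else 0) := by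
  have hb' : (0 : Int) < b := by omega
  rw [PySem.List.pyRange_of_pos _ _ hb', PySem.List.pyRange_of_pos _ _ hb',
    PySem.List.pyRange_of_pos _ _ hb']
  have hq : 0 ≤ (255 : Int) / b := Int.ediv_nonneg (by omega) (by omega)
  have hrq : r ≤ 255 / b := by
    rw [Int.le_ediv_iff_mul_le hb']; nlinarith
  have e0 : (256 - 0 + b - 1) / b = 255 / b + 1 := by
    have h : 256 - 0 + b - 1 = 255 + 1 * b := by ring
    rw [h, Int.add_mul_ediv_right _ _ (by omega)]
  have e1 : (r * b + 2 - (b + 1) + b - 1) / b = r := by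
    have h : r * b + 2 - (b + 1) + b - 1 = r * b := by ring
    rw [h, Int.mul_ediv_cancel _ (by omega)]
  have e2 : (256 - (r + 1) * b + b - 1) / b = 255 / b - r := by
    have h : 256 - (r + 1) * b + b - 1 = 255 + (-r) * b := by ring
    rw [h, Int.add_mul_ediv_right _ _ (by omega), ]
    ring
  rw [e0, e1, e2] at *
  rw [if_pos (by norm_num : (0:Int) < 256), ite_count _ _ ?h1, ite_count _ _ ?h2]
  case h1 =>
    intro hc
    have : r = 0 := by nlinarith [Int.lt_irrefl (r*b)]
    simp [this]
  case h2 =>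
    intro hc
    have heq : (r + 1) * b = 256 := by omega
    have : 255 / b = r := by
      have h : (255 : Int) = (b - 1) + b * r := by nlinarith
      rw [h, Int.add_mul_ediv_left _ _ (by omega : b ≠ 0)]
      rw [Int.ediv_eq_zero_of_lt (by omega) (by omega)]
      ring
    omega
  apply List.ext_getElem
  · simp; omega
  · intro j h1 h2
    simp only [List.getElem_mapIdx, List.getElem_map, List.getElem_range,
      List.getElem_cons, List.getElem_append, List.length_map, List.length_range]
    rcases Nat.eq_zero_or_pos j with hj0 | hjpos
    · subst hj0
      simp
    · rw [dif_neg (by omega : ¬ j = 0)]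
      by_cases hjr : j - 1 < r.toNat
      · rw [dif_pos hjr]
        have hcond : 1 ≤ j ∧ (j : Int) < 1 + r := by constructor <;> omega
        rw [if_pos hcond]
        have : ((j - 1 : Nat) : Int) = (j : Int) - 1 := by omega
        push_cast [this]
        ring_nf
      · rw [dif_neg hjr]
        have hcond : ¬ (1 ≤ j ∧ (j : Int) < 1 + r) := by
          intro ⟨ha, hb2⟩; omega
        rw [if_neg hcond]
        have hA : ((j - 1 - r.toNat : Nat) : Int) = (j : Int) - 1 - r := by omega
        push_cast [hA]
        ring

theorem core_eq (k : Int) (h1 : 1 ≤ k) (h2 : k ≤ 256) :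
    nivelarFixA (nivelarLoopA 300 0 (PySem.Int.floordiv 256 k) []).length
        (nivelarLoopA 300 0 (PySem.Int.floordiv 256 k) []) 0 (PySem.Int.mod 256 k) =
      (0 : Int) :: (PySem.List.pyRange (PySem.Int.floordiv 256 k + 1)
          (PySem.Int.mod 256 k * PySem.Int.floordiv 256 k + 2) (PySem.Int.floordiv 256 k)
        ++ PySem.List.pyRange ((PySem.Int.mod 256 k + 1) * PySem.Int.floordiv 256 k) 256
          (PySem.Int.floordiv 256 k)) := by
  have hb1 : (1 : Int) ≤ PySem.Int.floordiv 256 k := by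
    rw [PySem.Int.le_floordiv_iff_mul_le (by omega)]
    omega
  have hfd : PySem.Int.floordiv 256 k = 256 / k := PySem.Int.floordiv_eq_ediv_of_pos (by omega)
  have hmd : PySem.Int.mod 256 k = 256 % k := PySem.Int.mod_eq_emod_of_pos (by omega)
  have hr0 : 0 ≤ PySem.Int.mod 256 k := by rw [hmd]; exact Int.emod_nonneg _ (by omega)
  have hrk : PySem.Int.mod 256 k < k := by rw [hmd]; exact Int.emod_lt_of_pos _ (by omega)
  have hsum : k * PySem.Int.floordiv 256 k + PySem.Int.mod 256 k = 256 := by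
    rw [hfd, hmd]; exact Int.mul_ediv_add_emod 256 k
  have hrb : (PySem.Int.mod 256 k + 1) * PySem.Int.floordiv 256 k ≤ 256 := by nlinarith
  rw [loopA_eq 300 0 (PySem.Int.floordiv 256 k) [] (by omega) (by push_cast; nlinarith)]
  rw [List.nil_append, fix0_eq,
    ← seg_eq (PySem.Int.floordiv 256 k) (PySem.Int.mod 256 k) hb1 hr0 hrb]

-- ===== VERDICT (by name: the statement is the Claim_ definition above) =====
theorem nivelar_spec : Claim_equal_nivelar := by
  intro k _ hpre
  unfold Spec_nivelar
  obtain ⟨h1, h2⟩ := hpre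
  simp only [nivelar, nivelar_alt]
  rw [core_eq k h1 h2]
  simp [List.append_assoc]
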